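-- pv_equiv track=rewrite | github.com/wmcboler/Code-generator | main.py | secret_message_maker
-- ===== SOURCE A (Python) =====
-- def secret_message_maker(code):
--     original_code = list(code) # coverting string into a list and sending it variable
--     new_code = []  #list to send values to
--     for i in original_code: #iterate through each item of list
--
--         if i == "a":                  # takes each item through to check and cover to number
--             new_code.append("01")
--         elif i == "b":
--             new_code.append("02")
--         elif i == "c":
--             new_code.append("03")
--         elif i == "d":
--             new_code.append("04")
--         elif i == "e":
--             new_code.append("05")
--         elif i == "f":
--             new_code.append("06")
--         elif i == "g":
--             new_code.append("07")
--         elif i == "h":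
--             new_code.append("08")
--         elif i == "i":
--             new_code.append("09")
--         elif i == "j":
--             new_code.append("10")
--         elif i == "k":
--             new_code.append("11")
--         elif i == "l":
--             new_code.append("12")
--         elif i == "m":
--             new_code.append("13")
--         elif i == "n":
--             new_code.append("14")
--         elif i == "o":
--             new_code.append("15")
--         elif i == "p":
--             new_code.append("16")
--         elif i == "q":
--             new_code.append("17")
--         elif i == "r":
--             new_code.append("18")
--         elif i == "s":
--             new_code.append("19")
--         elif i == "t":
--             new_code.append("20")
--         elif i == "u":
--             new_code.append("21")
--         elif i == "v":
--             new_code.append("22")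
--         elif i == "w":
--             new_code.append("23")
--         elif i == "x":
--             new_code.append("24")
--         elif i == "y":
--             new_code.append("25")
--         elif i == "z":
--             new_code.append("26")
--         elif i == " ":
--             new_code.append("27")
--
--     return ".".join(new_code) #joins list together with period between each value
-- ===== SOURCE B (Python) =====
-- def secret_message_maker(code):
--     # Build the result string directly, right-to-left, without any intermediate
--     # list or join: each kept character's number is its position in the alphabet
--     # string (space included as 27th), formatted %02d.
--     alphabet = "abcdefghijklmnopqrstuvwxyz "
--     out = ""
--     for c in reversed(code):
--         k = alphabet.find(c)
--         if k >= 0: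
--             tok = "%02d" % (k + 1)
--             out = tok if out == "" else tok + "." + out
--     return out
-- ===== Notes on version B (the rewrite author's own statement) =====
-- stated objective: alternative
-- what changed: Instead of A's forward pass with a 27-branch if/elif table appending tokens to a list that is joined at the end, B traverses the string in reverse and builds the output string directly (prepending token and separator), looking each character's number up as its position in an alphabet string via find.
import Mathlib
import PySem

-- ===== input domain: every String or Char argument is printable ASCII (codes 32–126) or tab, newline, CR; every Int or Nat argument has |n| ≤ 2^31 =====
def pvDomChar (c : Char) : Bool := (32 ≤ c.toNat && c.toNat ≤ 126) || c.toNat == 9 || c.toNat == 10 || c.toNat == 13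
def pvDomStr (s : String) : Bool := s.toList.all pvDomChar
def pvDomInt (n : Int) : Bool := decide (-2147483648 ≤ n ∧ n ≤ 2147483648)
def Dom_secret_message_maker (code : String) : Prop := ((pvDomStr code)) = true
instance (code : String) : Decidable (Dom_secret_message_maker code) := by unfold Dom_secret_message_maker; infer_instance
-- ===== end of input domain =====

-- B replaces A's forward pass (27-branch table + list + join) by a reverse traversal that
-- builds the output string directly, using the character's position in an alphabet string
-- (objective: alternative; not claimed faster).

-- ===== PORT A =====
-- the body of A's for-loop: the 27-branch if/elif chain, appending to new_code
def pvStepA (acc : List String) (c : Char) : List String :=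
  if c = 'a' then acc ++ ["01"]
  else if c = 'b' then acc ++ ["02"]
  else if c = 'c' then acc ++ ["03"]
  else if c = 'd' then acc ++ ["04"]
  else if c = 'e' then acc ++ ["05"]
  else if c = 'f' then acc ++ ["06"]
  else if c = 'g' then acc ++ ["07"]
  else if c = 'h' then acc ++ ["08"]
  else if c = 'i' then acc ++ ["09"]
  else if c = 'j' then acc ++ ["10"]
  else if c = 'k' then acc ++ ["11"]
  else if c = 'l' then acc ++ ["12"]
  else if c = 'm' then acc ++ ["13"]
  else if c = 'n' then acc ++ ["14"]
  else if c = 'o' then acc ++ ["15"]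
  else if c = 'p' then acc ++ ["16"]
  else if c = 'q' then acc ++ ["17"]
  else if c = 'r' then acc ++ ["18"]
  else if c = 's' then acc ++ ["19"]
  else if c = 't' then acc ++ ["20"]
  else if c = 'u' then acc ++ ["21"]
  else if c = 'v' then acc ++ ["22"]
  else if c = 'w' then acc ++ ["23"]
  else if c = 'x' then acc ++ ["24"]
  else if c = 'y' then acc ++ ["25"]
  else if c = 'z' then acc ++ ["26"]
  else if c = ' ' then acc ++ ["27"]
  else acc

def secret_message_maker (code : String) : String :=
  let new_code := code.toList.foldl pvStepA []
  PySem.Str.join "." new_code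

-- ===== PORT B =====
-- Source B's alphabet string, as its character list
def pvAlphaC : List Char := "abcdefghijklmnopqrstuvwxyz ".toList

-- "%02d" % n, exact for 0 ≤ n ≤ 99: the two decimal digits (hand port of the format)
def pvPad2C (n : Int) : List Char :=
  [Char.ofNat (48 + n.toNat / 10), Char.ofNat (48 + n.toNat % 10)]

-- the body of Source B's loop over reversed(code): prepend the token (and '.' if out nonempty)
def pvStepB (out : List Char) (c : Char) : List Char :=
  let k := PySem.Chars.find pvAlphaC [c]
  if 0 ≤ k then
    let tok := pvPad2C (k + 1)
    if out = [] then tok else tok ++ '.' :: out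
  else out

def secret_message_maker_alt (code : String) : String :=
  String.ofList (code.toList.reverse.foldl pvStepB [])

-- ===== PRECONDITION & SPEC =====
def Spec_secret_message_maker (code : String) (out : String) : Prop := out = secret_message_maker_alt code
instance (code : String) (out : String) : Decidable (Spec_secret_message_maker code out) := by unfold Spec_secret_message_maker; infer_instance

-- ===== CLAIM (what is proved, stated in full; the proofs are below) =====
def Claim_equal_secret_message_maker : Prop := ∀ (code : String), Dom_secret_message_maker code → Spec_secret_message_maker code (secret_message_maker code)

-- ===== LEMMAS AND PROOFS =====

-- the token Source B produces for a character, or none if the character is skipped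
def pvTokC (c : Char) : Option (List Char) :=
  let k := PySem.Chars.find pvAlphaC [c]
  if 0 ≤ k then some (pvPad2C (k + 1)) else none

-- A's loop step appends exactly B's optional token (as a string)
lemma stepA_eq_tok (acc : List String) (c : Char) :
    pvStepA acc c = acc ++ ((pvTokC c).map String.ofList).toList := by
  by_cases h1 : c = 'a'
  · subst h1; rw [show ((pvTokC 'a').map String.ofList).toList = ["01"] from by decide]; simp [pvStepA]
  by_cases h2 : c = 'b'
  · subst h2; rw [show ((pvTokC 'b').map String.ofList).toList = ["02"] from by decide]; simp [pvStepA]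
  by_cases h3 : c = 'c'
  · subst h3; rw [show ((pvTokC 'c').map String.ofList).toList = ["03"] from by decide]; simp [pvStepA]
  by_cases h4 : c = 'd'
  · subst h4; rw [show ((pvTokC 'd').map String.ofList).toList = ["04"] from by decide]; simp [pvStepA]
  by_cases h5 : c = 'e'
  · subst h5; rw [show ((pvTokC 'e').map String.ofList).toList = ["05"] from by decide]; simp [pvStepA]
  by_cases h6 : c = 'f'
  · subst h6; rw [show ((pvTokC 'f').map String.ofList).toList = ["06"] from by decide]; simp [pvStepA]
  by_cases h7 : c = 'g'
  · subst h7; rw [show ((pvTokC 'g').map String.ofList).toList = ["07"] from by decide]; simp [pvStepA]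
  by_cases h8 : c = 'h'
  · subst h8; rw [show ((pvTokC 'h').map String.ofList).toList = ["08"] from by decide]; simp [pvStepA]
  by_cases h9 : c = 'i'
  · subst h9; rw [show ((pvTokC 'i').map String.ofList).toList = ["09"] from by decide]; simp [pvStepA]
  by_cases h10 : c = 'j'
  · subst h10; rw [show ((pvTokC 'j').map String.ofList).toList = ["10"] from by decide]; simp [pvStepA]
  by_cases h11 : c = 'k'
  · subst h11; rw [show ((pvTokC 'k').map String.ofList).toList = ["11"] from by decide]; simp [pvStepA]
  by_cases h12 : c = 'l'
  · subst h12; rw [show ((pvTokC 'l').map String.ofList).toList = ["12"] from by decide]; simp [pvStepA]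
  by_cases h13 : c = 'm'
  · subst h13; rw [show ((pvTokC 'm').map String.ofList).toList = ["13"] from by decide]; simp [pvStepA]
  by_cases h14 : c = 'n'
  · subst h14; rw [show ((pvTokC 'n').map String.ofList).toList = ["14"] from by decide]; simp [pvStepA]
  by_cases h15 : c = 'o'
  · subst h15; rw [show ((pvTokC 'o').map String.ofList).toList = ["15"] from by decide]; simp [pvStepA]
  by_cases h16 : c = 'p'
  · subst h16; rw [show ((pvTokC 'p').map String.ofList).toList = ["16"] from by decide]; simp [pvStepA]
  by_cases h17 : c = 'q'
  · subst h17; rw [show ((pvTokC 'q').map String.ofList).toList = ["17"] from by decide]; simp [pvStepA]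
  by_cases h18 : c = 'r'
  · subst h18; rw [show ((pvTokC 'r').map String.ofList).toList = ["18"] from by decide]; simp [pvStepA]
  by_cases h19 : c = 's'
  · subst h19; rw [show ((pvTokC 's').map String.ofList).toList = ["19"] from by decide]; simp [pvStepA]
  by_cases h20 : c = 't'
  · subst h20; rw [show ((pvTokC 't').map String.ofList).toList = ["20"] from by decide]; simp [pvStepA]
  by_cases h21 : c = 'u'
  · subst h21; rw [show ((pvTokC 'u').map String.ofList).toList = ["21"] from by decide]; simp [pvStepA]
  by_cases h22 : c = 'v'
  · subst h22; rw [show ((pvTokC 'v').map String.ofList).toList = ["22"] from by decide]; simp [pvStepA]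
  by_cases h23 : c = 'w'
  · subst h23; rw [show ((pvTokC 'w').map String.ofList).toList = ["23"] from by decide]; simp [pvStepA]
  by_cases h24 : c = 'x'
  · subst h24; rw [show ((pvTokC 'x').map String.ofList).toList = ["24"] from by decide]; simp [pvStepA]
  by_cases h25 : c = 'y'
  · subst h25; rw [show ((pvTokC 'y').map String.ofList).toList = ["25"] from by decide]; simp [pvStepA]
  by_cases h26 : c = 'z'
  · subst h26; rw [show ((pvTokC 'z').map String.ofList).toList = ["26"] from by decide]; simp [pvStepA]
  by_cases h27 : c = ' '
  · subst h27; rw [show ((pvTokC ' ').map String.ofList).toList = ["27"] from by decide]; simp [pvStepA]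
  -- c is none of the 27 handled characters: both sides drop it
  have hmem : c ∉ pvAlphaC := by
    simp only [pvAlphaC]
    simp [h1, h2, h3, h4, h5, h6, h7, h8, h9, h10, h11, h12, h13, h14, h15, h16,
      h17, h18, h19, h20, h21, h22, h23, h24, h25, h26, h27]
  have hfind : PySem.Chars.find pvAlphaC [c] = -1 := by
    rw [PySem.Chars.find_eq_neg_one_iff]
    intro hinf
    exact hmem (List.singleton_sublist.mp hinf.sublist)
  rw [show pvTokC c = none from by simp [pvTokC, hfind]]
  simp [pvStepA, h1, h2, h3, h4, h5, h6, h7, h8, h9, h10, h11, h12, h13, h14, h15,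
    h16, h17, h18, h19, h20, h21, h22, h23, h24, h25, h26, h27]

-- A's whole loop produces exactly the token list (generalised over the accumulator)
lemma foldl_stepA_eq (cs : List Char) (acc : List String) :
    cs.foldl pvStepA acc = acc ++ (cs.filterMap pvTokC).map String.ofList := by
  induction cs generalizing acc with
  | nil => simp
  | cons c cs ih =>
    simp only [List.foldl_cons, List.filterMap_cons, ih, stepA_eq_tok]
    cases pvTokC c <;> simp

-- joining a list headed by a nonempty token never gives the empty list
lemma join_cons_ne_nil (t : List Char) (ts : List (List Char)) (ht : t ≠ []) :
    PySem.Chars.join ['.'] (t :: ts) ≠ [] := by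
  cases ts with
  | nil => simpa [PySem.Chars.join_singleton] using ht
  | cons u us =>
    rw [PySem.Chars.join_cons_cons]
    simp [ht]

-- B's loop step, expressed through the optional token
lemma stepB_eq (out : List Char) (c : Char) :
    pvStepB out c = match pvTokC c with
      | none => out
      | some tok => if out = [] then tok else tok ++ '.' :: out := by
  unfold pvStepB pvTokC
  by_cases hk : 0 ≤ PySem.Chars.find pvAlphaC [c] <;> simp [hk]

-- every token Source B produces is nonempty (it is two digit characters)
lemma tok_ne_nil (c : Char) (t : List Char) (h : pvTokC c = some t) : t ≠ [] := by
  by_cases hk : 0 ≤ PySem.Chars.find pvAlphaC [c]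
  · unfold pvTokC at h
    simp only [hk, if_pos] at h
    have h' := Option.some.inj h
    rw [← h']; simp [pvPad2C]
  · unfold pvTokC at h
    simp [hk] at h

-- B's whole reverse loop builds exactly the join of the token list
lemma foldl_stepB_eq (cs : List Char) :
    cs.reverse.foldl pvStepB [] = PySem.Chars.join ['.'] (cs.filterMap pvTokC) := by
  rw [List.foldl_reverse]
  induction cs with
  | nil => rfl
  | cons c cs ih =>
    rw [List.foldr_cons, ih, stepB_eq, List.filterMap_cons]
    cases htok : pvTokC c with
    | none => simp
    | some tok =>
      simp only []
      cases hts : cs.filterMap pvTokC with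
      | nil =>
        simp [show PySem.Chars.join ['.'] ([] : List (List Char)) = [] from rfl,
          PySem.Chars.join_singleton]
      | cons t ts =>
        have hm : t ∈ cs.filterMap pvTokC := by rw [hts]; exact List.mem_cons_self ..
        obtain ⟨d, -, hd⟩ := List.mem_filterMap.mp hm
        have ht2 : t ≠ [] := tok_ne_nil d t hd
        have hne := join_cons_ne_nil t ts ht2
        rw [PySem.Chars.join_cons_cons]
        simp [hne]

-- ===== VERDICT (by name: the statement is the Claim_ definition above) =====
theorem secret_message_maker_spec : Claim_equal_secret_message_maker := by
  intro code _
  unfold Spec_secret_message_maker secret_message_maker secret_message_maker_alt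
  rw [foldl_stepA_eq, List.nil_append, foldl_stepB_eq]
  apply String.ext
  simp only [PySem.Str.toList_join, List.map_map]
  have h1 : String.toList ∘ String.ofList = id := funext fun l => by simp
  rw [h1, List.map_id]
  simp
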